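-- pv_equiv track=rewrite | github.com/metatensor/metatrain | src/metatrain/pet/trainer.py | _var_key_to_metric_name
-- ===== SOURCE A (Python) =====
-- _DECOMPOSED_PREFIXES = {
--     "energy_l": "energy",
--     "forces_l": "forces",
--     "non_conservative_forces_l": "non_conservative_forces",
--     "stress_l": "stress",
--     "non_conservative_stress_l": "non_conservative_stress",
-- }
--
-- def _var_key_to_metric_name(var_key: str, per_atom: bool) -> str:
--     """Convert a variance key from ``symmetrize_over_grid`` to a ``MetricLogger``
--     metric name.
--
--     The metric name has the format ``"{target} {description}"`` so that
--     ``MetricLogger`` can look up the target in ``model_outputs`` for units.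
--
--     :param var_key: key from ``symmetrize_over_grid`` ending in ``_var``
--     :param per_atom: whether the metric has been divided by the number of atoms
--
--     Examples::
--
--         "energy_l0_var", True   -> "energy L0 std (per atom)"
--         "non_conservative_forces_l1_var", False -> "non_conservative_forces L1 std"
--         "my_custom_target_var", True  -> "my_custom_target std (per atom)"
--     """
--     per_atom_suffix = " (per atom)" if per_atom else ""
--
--     # Split off per-block suffix like " (o3_lambda=0,...)" if present
--     block_suffix = ""
--     if " (" in var_key:
--         var_key, block_suffix = var_key.split(" (", 1)
--         block_suffix = " (" + block_suffix
--
--     # Try to match a known decomposed prefix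
--     for prefix, target_name in _DECOMPOSED_PREFIXES.items():
--         if var_key.startswith(prefix) and var_key.endswith("_var"):
--             middle = var_key[len(prefix) : -len("_var")]
--             return f"{target_name} L{middle} std{per_atom_suffix}{block_suffix}"
--
--     # Generic target: "my_target_var" -> "my_target std ..."
--     if var_key.endswith("_var"):
--         target_name = var_key[: -len("_var")]
--         return f"{target_name} std{per_atom_suffix}{block_suffix}"
--
--     return var_key + block_suffix
-- ===== SOURCE B (Python) =====
-- _TARGETS = ("energy", "forces", "stress",
--             "non_conservative_forces", "non_conservative_stress")
--
--
-- def _var_key_to_metric_name(var_key: str, per_atom: bool) -> str: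
--     """Token-based conversion: partition off the block suffix, strip '_var',
--     split the stem into '_'-tokens and test the decomposed shape positionally
--     (target tokens, then an 'l...' token), reassembling with '_'.join."""
--     suffix = " (per atom)" if per_atom else ""
--     base, sep, rest = var_key.partition(" (")
--     block = sep + rest
--     if not base.endswith("_var"):
--         return base + block
--     stem = base[:-4]
--     tokens = stem.split("_")
--     k = 3 if tokens[:2] == ["non", "conservative"] else 1
--     if len(tokens) > k and tokens[k].startswith("l") and "_".join(tokens[:k]) in _TARGETS:
--         return f'{"_".join(tokens[:k])} L{"_".join(tokens[k:])[1:]} std{suffix}{block}'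
--     return f"{stem} std{suffix}{block}"
-- ===== Notes on version B (the rewrite author's own statement) =====
-- stated objective: alternative
-- what changed: Replaces A's scan over the five-entry prefix dict (startswith/endswith inside a loop) by a tokenization pipeline: partition off the block suffix, strip '_var', split the stem on '_' and test the decomposed shape positionally on the token list (two fixed token-count cases, an 'l...'-marker token), reassembling the pieces with '_'.join.
import Mathlib
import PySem

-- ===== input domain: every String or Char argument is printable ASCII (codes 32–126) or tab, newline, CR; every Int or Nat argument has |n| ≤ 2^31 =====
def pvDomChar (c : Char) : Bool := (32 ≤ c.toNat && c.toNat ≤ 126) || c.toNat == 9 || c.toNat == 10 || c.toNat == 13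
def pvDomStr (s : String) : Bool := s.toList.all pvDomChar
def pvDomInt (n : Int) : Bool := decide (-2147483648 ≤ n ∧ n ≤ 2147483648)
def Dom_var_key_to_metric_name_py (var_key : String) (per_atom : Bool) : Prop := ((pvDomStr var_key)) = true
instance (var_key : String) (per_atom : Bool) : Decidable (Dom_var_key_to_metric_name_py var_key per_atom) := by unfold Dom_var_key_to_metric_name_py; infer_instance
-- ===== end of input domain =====

-- B replaces A's scan over the five-entry prefix dict by a tokenization pipeline:
-- partition off the block suffix, strip "_var", split the stem on "_" and test the
-- token list positionally, reassembling with "_".join (objective: alternative).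

-- ===== PORT A =====
-- the module-level _DECOMPOSED_PREFIXES dict (insertion order)
def pvAPrefixes : List (List Char × List Char) :=
  [("energy_l".toList, "energy".toList),
   ("forces_l".toList, "forces".toList),
   ("non_conservative_forces_l".toList, "non_conservative_forces".toList),
   ("stress_l".toList, "stress".toList),
   ("non_conservative_stress_l".toList, "non_conservative_stress".toList)]

-- the 'for prefix, target_name in _DECOMPOSED_PREFIXES.items(): if …: return …' loop
def pvALoop (vk pas block : List Char) : List (List Char × List Char) → Option (List Char)
  | [] => none
  | (pre, tgt) :: rest =>
    if PySem.Chars.startswith vk pre && PySem.Chars.endswith vk "_var".toList then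
      some (tgt ++ " L".toList ++ PySem.List.slice vk (some (pre.length : Int)) (some (-4)) ++
            " std".toList ++ pas ++ block)
    else pvALoop vk pas block rest

def pvA (vk0 : List Char) (per_atom : Bool) : List Char :=
  let pas : List Char := if per_atom then " (per atom)".toList else []
  -- if " (" in var_key: var_key, block_suffix = var_key.split(" (", 1); block_suffix = " (" + block_suffix
  let vb : List Char × List Char :=
    if PySem.Chars.isIn " (".toList vk0 then
      match PySem.Chars.splitOnMax vk0 " (".toList 1 with
      | a :: b :: _ => (a, " (".toList ++ b)
      | _ => (vk0, [])      -- unreachable (split with one found separator yields two pieces)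
    else (vk0, [])
  match pvALoop vb.1 pas vb.2 pvAPrefixes with
  | some r => r
  | none =>
    if PySem.Chars.endswith vb.1 "_var".toList then
      PySem.List.slice vb.1 none (some (-4)) ++ " std".toList ++ pas ++ vb.2
    else vb.1 ++ vb.2

def var_key_to_metric_name_py (var_key : String) (per_atom : Bool) : String :=
  String.ofList (pvA var_key.toList per_atom)

-- ===== PORT B =====
-- the module-level _TARGETS tuple
def pvBTargets : List (List Char) :=
  ["energy".toList, "forces".toList, "stress".toList,
   "non_conservative_forces".toList, "non_conservative_stress".toList]

def pvB (vk : List Char) (pa : Bool) : List Char :=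
  let suffix : List Char := if pa then " (per atom)".toList else []
  -- base, sep, rest = var_key.partition(" ("); block = sep + rest  (partition = split at the
  -- first occurrence of " ("; exact via find + slices)
  let cut := PySem.Chars.find vk " (".toList
  let base := if cut = -1 then vk else PySem.List.slice vk none (some cut)
  let block := if cut = -1 then [] else PySem.List.slice vk (some cut) none
  if PySem.Chars.endswith base "_var".toList then
    let stem := PySem.List.slice base none (some (-4))
    let tokens := PySem.Chars.splitOn stem "_".toList
    let k : Nat := if tokens.take 2 = ["non".toList, "conservative".toList] then 3 else 1
    -- tokens[k] is only read under the guard len(tokens) > k (Python's short-circuit `and`)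
    if decide (k < tokens.length) &&
       PySem.Chars.startswith (tokens.getD k []) "l".toList &&
       pvBTargets.contains (PySem.Chars.join "_".toList (tokens.take k)) then
      PySem.Chars.join "_".toList (tokens.take k) ++ " L".toList ++
        PySem.List.slice (PySem.Chars.join "_".toList (tokens.drop k)) (some 1) none ++
        " std".toList ++ suffix ++ block
    else stem ++ " std".toList ++ suffix ++ block
  else base ++ block

def var_key_to_metric_name_py_alt (var_key : String) (per_atom : Bool) : String :=
  String.ofList (pvB var_key.toList per_atom)

-- ===== PRECONDITION & SPEC =====
def Spec_var_key_to_metric_name_py (var_key : String) (per_atom : Bool) (out : String) : Prop := out = var_key_to_metric_name_py_alt var_key per_atom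
instance (var_key : String) (per_atom : Bool) (out : String) : Decidable (Spec_var_key_to_metric_name_py var_key per_atom out) := by unfold Spec_var_key_to_metric_name_py; infer_instance

-- ===== CLAIM (what is proved, stated in full; the proofs are below) =====
def Claim_equal_var_key_to_metric_name_py : Prop := ∀ (var_key : String) (per_atom : Bool), Dom_var_key_to_metric_name_py var_key per_atom → Spec_var_key_to_metric_name_py var_key per_atom (var_key_to_metric_name_py var_key per_atom)

-- ===== LEMMAS AND PROOFS =====

-- ---------- generic facts about Chars.find / splitOnMax (used for the " (" split) ----------

-- find s sub = k as soon as sub occurs at k and at no earlier index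
theorem pv_find_eq_of (s sub : List Char) (k : Nat) (h1 : sub <+: s.drop k)
    (h2 : ∀ i, i < k → ¬ sub <+: s.drop i) : PySem.Chars.find s sub = (k : Int) := by
  have hin : PySem.Chars.isIn sub s = true :=
    (PySem.Chars.exists_prefix_drop_iff_isIn sub s).1 ⟨k, h1⟩
  have hne : PySem.Chars.find s sub ≠ -1 := by
    rw [PySem.Chars.find_ne_neg_one_iff]
    exact (PySem.Chars.isIn_iff_infix sub s).1 hin
  have hnn : 0 ≤ PySem.Chars.find s sub := by
    have := PySem.Chars.neg_one_le_find s sub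
    omega
  obtain ⟨hat, hmin⟩ := PySem.Chars.find_spec hnn
  have : (PySem.Chars.find s sub).toNat = k := by
    rcases Nat.lt_trichotomy (PySem.Chars.find s sub).toNat k with h | h | h
    · exact absurd hat (h2 _ h)
    · exact h
    · exact absurd h1 (hmin _ h)
  omega

theorem pv_find_prefix (s sub : List Char) (h : sub <+: s) : PySem.Chars.find s sub = 0 := by
  have hnn : 0 ≤ PySem.Chars.find s sub := by
    have h1 : PySem.Chars.find s sub ≠ -1 := by
      rw [PySem.Chars.find_ne_neg_one_iff]; exact h.isInfix
    have := PySem.Chars.neg_one_le_find s sub; omega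
  obtain ⟨hat, hmin⟩ := PySem.Chars.find_spec hnn
  by_contra hne0
  have : 0 < (PySem.Chars.find s sub).toNat := by omega
  exact hmin 0 this (by simpa using h)

theorem pv_not_infix_cons (sep : List Char) (c : Char) (rest : List Char)
    (h0 : ¬ sep <+: (c :: rest)) (h1 : ¬ sep <:+: rest) : ¬ sep <:+: (c :: rest) := by
  intro hin
  obtain ⟨j, hj⟩ := (PySem.Chars.exists_prefix_drop_iff_isIn sep (c :: rest)).2
    ((PySem.Chars.isIn_iff_infix sep (c :: rest)).2 hin)
  cases j with
  | zero => exact h0 (by simpa using hj)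
  | succ j' =>
    exact h1 ((PySem.Chars.isIn_iff_infix sep rest).1
      ((PySem.Chars.exists_prefix_drop_iff_isIn sep rest).1 ⟨j', by simpa using hj⟩))

theorem pv_find_cons (sep : List Char) (c : Char) (rest : List Char)
    (h : ¬ sep <+: (c :: rest)) :
    PySem.Chars.find (c :: rest) sep =
      (if PySem.Chars.find rest sep = -1 then -1 else PySem.Chars.find rest sep + 1) := by
  by_cases hr : PySem.Chars.find rest sep = -1
  · rw [if_pos hr]
    rw [PySem.Chars.find_eq_neg_one_iff] at hr ⊢
    exact pv_not_infix_cons sep c rest h hr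
  · rw [if_neg hr]
    have hnn : 0 ≤ PySem.Chars.find rest sep := by
      have := PySem.Chars.neg_one_le_find rest sep; omega
    obtain ⟨hat, hmin⟩ := PySem.Chars.find_spec hnn
    have : PySem.Chars.find (c :: rest) sep = (((PySem.Chars.find rest sep).toNat + 1 : Nat) : Int) := by
      apply pv_find_eq_of
      · simpa using hat
      · intro i hi
        cases i with
        | zero => simpa using h
        | succ i' => simpa using hmin i' (by omega)
    omega

theorem pv_go_zero (sep : List Char) (fuel : Nat) (l cur : List Char) (acc : List (List Char)) :
    PySem.Chars.splitOnMax.go sep fuel 0 l cur acc = ((cur.reverse ++ l) :: acc).reverse := by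
  cases fuel with
  | zero => simp [PySem.Chars.splitOnMax.go]
  | succ f =>
    cases l with
    | nil => simp [PySem.Chars.splitOnMax.go]
    | cons c rest => simp [PySem.Chars.splitOnMax.go]

theorem pv_go_one (sep : List Char) (hsep : sep ≠ []) :
    ∀ (fuel : Nat) (l cur : List Char) (acc : List (List Char)), l.length < fuel →
    PySem.Chars.splitOnMax.go sep fuel 1 l cur acc =
      (if PySem.Chars.find l sep = -1 then acc.reverse ++ [cur.reverse ++ l]
       else acc.reverse ++ [cur.reverse ++ l.take (PySem.Chars.find l sep).toNat,
                            l.drop ((PySem.Chars.find l sep).toNat + sep.length)]) := by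
  intro fuel
  induction fuel with
  | zero => intro l cur acc h; omega
  | succ f ih =>
    intro l cur acc h
    cases l with
    | nil =>
      have : PySem.Chars.find [] sep = -1 := by
        rw [PySem.Chars.find_eq_neg_one_iff]
        intro hin
        have := hin.length_le
        simp at this
        exact hsep this
      rw [this]
      simp [PySem.Chars.splitOnMax.go]
    | cons c rest =>
      by_cases hp : sep.isPrefixOf (c :: rest)
      · have hpre : sep <+: (c :: rest) := List.isPrefixOf_iff_prefix.1 hp
        have hf : PySem.Chars.find (c :: rest) sep = 0 := pv_find_prefix _ _ hpre
        rw [hf]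
        simp only [PySem.Chars.splitOnMax.go, if_neg (by omega : ¬ (1:Nat) = 0), if_pos hp]
        rw [pv_go_zero]
        simp
      · have hpre : ¬ sep <+: (c :: rest) := fun hh => hp (List.isPrefixOf_iff_prefix.2 hh)
        have hstep : PySem.Chars.splitOnMax.go sep (f+1) 1 (c :: rest) cur acc =
            PySem.Chars.splitOnMax.go sep f 1 rest (c :: cur) acc := by
          simp [PySem.Chars.splitOnMax.go, hp]
        rw [hstep, ih rest (c :: cur) acc (by simp only [List.length_cons] at h; omega)]
        rw [pv_find_cons sep c rest hpre]
        by_cases hr : PySem.Chars.find rest sep = -1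
        · simp only [if_pos hr]
          simp
        · have hnn : 0 ≤ PySem.Chars.find rest sep := by
            have := PySem.Chars.neg_one_le_find rest sep; omega
          simp only [if_neg hr]
          rw [if_neg (show ¬ (PySem.Chars.find rest sep + 1 = -1) by omega)]
          have e1 : (PySem.Chars.find rest sep + 1).toNat = (PySem.Chars.find rest sep).toNat + 1 := by omega
          rw [e1]
          rw [show (PySem.Chars.find rest sep).toNat + 1 + sep.length =
                ((PySem.Chars.find rest sep).toNat + sep.length) + 1 by omega,
              List.drop_succ_cons]
          simp

-- str.split(sep, 1) with sep present = the two pieces around the first occurrence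
theorem pv_split_eq (vk : List Char) (h : PySem.Chars.find vk [' ', '('] ≠ -1) :
    PySem.Chars.splitOnMax vk [' ', '('] 1 =
      [vk.take (PySem.Chars.find vk [' ', '(']).toNat,
       vk.drop ((PySem.Chars.find vk [' ', '(']).toNat + 2)] := by
  unfold PySem.Chars.splitOnMax
  rw [if_neg (by omega : ¬ (1:Int) < 0)]
  simp only [Int.toNat_one]
  rw [pv_go_one [' ', '('] (by decide) (vk.length + 1) vk [] [] (by omega)]
  rw [if_neg h]
  simp

-- ---------- slice facts ----------

theorem pv_slice_neg4 (l : List Char) :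
    PySem.List.slice l none (some (-4)) = l.take (l.length - 4) := by
  simp [PySem.List.slice, PySem.List.clampIdx]
  split_ifs with h1 <;> omega

theorem pv_slice_mid (u v : List Char) (n : Int) (hn : n = (u.length : Int)) :
    PySem.List.slice (u ++ v ++ ['_', 'v', 'a', 'r']) (some n) (some (-4)) = v := by
  subst hn
  simp only [PySem.List.slice, PySem.List.clampIdx]
  have h1 : ¬ ((u.length : Int) < 0) := by omega
  have h2 : ¬ ((((u ++ v ++ ['_','v','a','r']).length : Int)) + (-4) < 0) := by
    simp [List.length_append]
    omega
  simp only [if_neg h1, if_pos (by omega : (-4:Int) < 0), if_neg h2]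
  have e2 : (((u ++ v ++ ['_','v','a','r']).length : Int) + (-4)).toNat = u.length + v.length := by
    simp [List.length_append]
    omega
  have e3 : min (u.length : Int).toNat (u ++ v ++ ['_','v','a','r']).length = u.length := by
    simp [List.length_append]
  rw [e2, e3]
  rw [show u ++ v ++ ['_','v','a','r'] = u ++ (v ++ ['_','v','a','r']) by simp]
  rw [List.drop_left' rfl]
  rw [show u.length + v.length - u.length = v.length by omega]
  rw [List.take_append_of_le_length (by omega), List.take_length]

theorem pv_stem_eq (pre : List Char) :
    PySem.List.slice (pre ++ ['_', 'v', 'a', 'r']) none (some (-4)) = pre := by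
  rw [pv_slice_neg4]
  rw [show (pre ++ ['_', 'v', 'a', 'r']).length - 4 = pre.length by simp]
  exact List.take_left' rfl

-- a prefix t ++ "_l" seen through the trailing "_var" is a prefix of the part before it
theorem pv_prefix_through_var (t pre : List Char)
    (h : (t ++ ['_', 'l']) <+: (pre ++ ['_', 'v', 'a', 'r'])) : (t ++ ['_', 'l']) <+: pre := by
  by_cases hle : t.length + 2 ≤ pre.length
  · have htake := List.prefix_iff_eq_take.1 h
    rw [List.length_append, List.take_append_of_le_length (by simpa using hle)] at htake
    rw [List.prefix_iff_eq_take, List.length_append]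
    simpa using htake
  · exfalso
    have hlen : t.length + 2 ≤ pre.length + 4 := by
      have := h.length_le; simp [List.length_append] at this; omega
    have hi : t.length + 1 < (t ++ ['_', 'l']).length := by simp
    have h1 := h.getElem (i := t.length + 1) hi
    rw [List.getElem_append_right (by omega), List.getElem_append_right (by omega)] at h1
    have e1 : t.length + 1 - t.length = 1 := by omega
    simp only [e1, List.getElem_cons_succ, List.getElem_cons_zero] at h1
    have hmem : 'l' ∈ ['_', 'v', 'a', 'r'] := h1 ▸ List.getElem_mem _
    exact absurd hmem (by decide)

theorem pv_startA (t pre : List Char) :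
    PySem.Chars.startswith (pre ++ ['_', 'v', 'a', 'r']) (t ++ ['_', 'l']) =
      decide ((t ++ ['_', 'l']) <+: pre) := by
  by_cases h : (t ++ ['_', 'l']) <+: pre
  · rw [decide_eq_true h]
    exact (PySem.Chars.startswith_iff _ _).2 (h.trans (List.prefix_append _ _))
  · rw [decide_eq_false h, Bool.eq_false_iff]
    intro hs
    exact h (pv_prefix_through_var t pre ((PySem.Chars.startswith_iff _ _).1 hs))

theorem pv_endsA (pre : List Char) :
    PySem.Chars.endswith (pre ++ ['_', 'v', 'a', 'r']) "_var".toList = true := by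
  rw [show ("_var".toList : List Char) = ['_', 'v', 'a', 'r'] by decide]
  exact (PySem.Chars.endswith_iff _ _).2 ⟨pre, rfl⟩

-- ---------- PySem.Chars.splitOn "_" is Mathlib's List.splitOn '_' ----------

theorem pv_go_splitOn (fuel : Nat) (l cur : List Char) (acc : List (List Char))
    (h : l.length < fuel) :
    PySem.Chars.splitOn.go ['_'] fuel l cur acc =
      acc.reverse ++ (l.splitOn '_').modifyHead (cur.reverse ++ ·) := by
  induction fuel generalizing l cur acc with
  | zero => omega
  | succ f ih =>
    cases l with
    | nil => simp [PySem.Chars.splitOn.go, List.splitOn]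
    | cons c rest =>
      by_cases hc : c = '_'
      · subst hc
        have hp : List.isPrefixOf ['_'] ('_' :: rest) = true := by simp [List.isPrefixOf]
        rw [show PySem.Chars.splitOn.go ['_'] (f+1) ('_' :: rest) cur acc =
              PySem.Chars.splitOn.go ['_'] f (List.drop (['_'] : List Char).length ('_' :: rest))
                [] (cur.reverse :: acc) by simp [PySem.Chars.splitOn.go, hp]]
        simp only [List.length_cons, List.length_nil, List.drop_succ_cons, List.drop_zero]
        rw [ih rest [] (cur.reverse :: acc) (by simp at h; omega)]
        have hsplit : ('_' :: rest).splitOn '_' = [] :: rest.splitOn '_' := by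
          simp [List.splitOn, List.splitOnP_cons]
        rw [hsplit]
        rcases hr : rest.splitOn '_' with - | ⟨h0, hs⟩
        · exact absurd hr (List.splitOnP_ne_nil _ rest)
        · simp
      · have hp : List.isPrefixOf ['_'] (c :: rest) = false := by
          simp [List.isPrefixOf]
          exact fun hh => absurd hh.symm hc
        rw [show PySem.Chars.splitOn.go ['_'] (f+1) (c :: rest) cur acc =
              PySem.Chars.splitOn.go ['_'] f rest (c :: cur) acc by
            simp [PySem.Chars.splitOn.go, hp]]
        rw [ih rest (c :: cur) acc (by simp at h; omega)]
        have hsplit : (c :: rest).splitOn '_' = (rest.splitOn '_').modifyHead (c :: ·) := by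
          simp only [List.splitOn, List.splitOnP_cons, beq_iff_eq, if_neg hc]
        rw [hsplit]
        rcases hr : rest.splitOn '_' with - | ⟨h0, hs⟩
        · exact absurd hr (List.splitOnP_ne_nil _ rest)
        · simp

theorem pv_splitOn_eq (l : List Char) :
    PySem.Chars.splitOn l "_".toList = l.splitOn '_' := by
  have h : PySem.Chars.splitOn l "_".toList =
      PySem.Chars.splitOn.go ['_'] (l.length + 1) l [] [] := rfl
  rw [h, pv_go_splitOn (l.length + 1) l [] [] (by omega)]
  rcases hr : l.splitOn '_' with - | ⟨h0, hs⟩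
  · exact absurd hr (List.splitOnP_ne_nil _ l)
  · simp

-- every token produced by splitOn '_' is '_'-free
theorem pv_no_sep (xs : List Char) : ∀ t ∈ xs.splitOn '_', '_' ∉ t := by
  induction xs with
  | nil =>
    intro t ht
    simp [List.splitOn] at ht
    simp [ht]
  | cons c rest ih =>
    intro t ht
    by_cases hc : c = '_'
    · subst hc
      rw [show ('_' :: rest).splitOn '_' = [] :: rest.splitOn '_' by
            simp [List.splitOn, List.splitOnP_cons]] at ht
      rcases List.mem_cons.1 ht with h | h
      · simp [h]
      · exact ih t h
    · rw [show (c :: rest).splitOn '_' = (rest.splitOn '_').modifyHead (c :: ·) by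
            simp only [List.splitOn, List.splitOnP_cons, beq_iff_eq, if_neg hc]] at ht
      rcases hr : rest.splitOn '_' with - | ⟨h0, hs⟩
      · exact absurd hr (List.splitOnP_ne_nil _ rest)
      · rw [hr] at ht
        simp only [List.modifyHead_cons] at ht
        rcases List.mem_cons.1 ht with h | h
        · subst h
          intro hmem
          rcases List.mem_cons.1 hmem with h' | h'
          · exact hc h'.symm
          · exact ih h0 (hr ▸ List.mem_cons_self) h'
        · exact ih t (hr ▸ List.mem_cons_of_mem _ h)

-- splitting off a leading '_'-free chunk
theorem pv_splitOn_append (t u : List Char) (ht : '_' ∉ t) :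
    (t ++ '_' :: u).splitOn '_' = t :: u.splitOn '_' := by
  simp only [List.splitOn]
  refine List.splitOnP_first _ t ?_ '_' (by simp) u
  intro x hx
  simp only [beq_iff_eq]
  exact fun he => ht (he ▸ hx)

-- intercalate expansion
theorem pv_ic_single (a : List Char) : ['_'].intercalate [a] = a := by
  simp [List.intercalate]

theorem pv_ic_cons₂ (a b : List Char) (l : List (List Char)) :
    ['_'].intercalate (a :: b :: l) = a ++ '_' :: ['_'].intercalate (b :: l) := by
  simp [List.intercalate, List.intersperse_cons₂]

-- the joined tail starting with an 'l'-token is 'l' followed by something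
theorem pv_J (m : List Char) (rest : List (List Char)) :
    ∃ X, ['_'].intercalate (('l' :: m) :: rest) = 'l' :: X := by
  cases rest with
  | nil => exact ⟨m, pv_ic_single _⟩
  | cons r rs => exact ⟨m ++ '_' :: ['_'].intercalate (r :: rs), by rw [pv_ic_cons₂]; simp⟩

-- peel one '_'-free token off a prefix condition
theorem pv_peel (t w pre : List Char) (ht : '_' ∉ t) :
    ((t ++ '_' :: w) <+: pre) ↔ ∃ q, pre.splitOn '_' = t :: q.splitOn '_' ∧ w <+: q := by
  constructor
  · rintro ⟨v, hv⟩
    refine ⟨w ++ v, ?_, List.prefix_append _ _⟩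
    rw [← hv, show (t ++ '_' :: w) ++ v = t ++ '_' :: (w ++ v) by simp]
    exact pv_splitOn_append t (w ++ v) ht
  · rintro ⟨q, hq, hw⟩
    have hpre : pre = t ++ '_' :: q := by
      have h1 : ['_'].intercalate (pre.splitOn '_') = pre := List.intercalate_splitOn pre '_'
      rw [hq] at h1
      rcases hr : q.splitOn '_' with - | ⟨h0, hs⟩
      · exact absurd hr (List.splitOnP_ne_nil _ q)
      · rw [hr, pv_ic_cons₂, ← hr, List.intercalate_splitOn q '_'] at h1
        exact h1.symm
    rw [hpre]
    obtain ⟨v, hv⟩ := hw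
    exact ⟨v, by rw [← hv]; simp⟩

-- shape of the token list when a 1-token decomposed prefix matches
theorem pv_shape1 (t pre : List Char) (ht : '_' ∉ t) :
    ((t ++ ['_', 'l']) <+: pre) ↔ ∃ m rest, pre.splitOn '_' = t :: ('l' :: m) :: rest := by
  rw [show t ++ ['_', 'l'] = t ++ '_' :: ['l'] by simp, pv_peel t ['l'] pre ht]
  constructor
  · rintro ⟨q, hq, hw⟩
    obtain ⟨m, rfl⟩ : ∃ m, q = 'l' :: m := by
      rcases q with - | ⟨c, q'⟩
      · exact absurd hw.length_le (by simp)
      · obtain rfl : 'l' = c := by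
          have := hw.getElem (i := 0) (by simp)
          simpa using this
        exact ⟨q', rfl⟩
    rcases hr : m.splitOn '_' with - | ⟨h0, hs⟩
    · exact absurd hr (List.splitOnP_ne_nil _ m)
    · refine ⟨h0, hs, ?_⟩
      rw [hq, show ('l' :: m).splitOn '_' = (m.splitOn '_').modifyHead ('l' :: ·) by
            simp [List.splitOn, List.splitOnP_cons], hr]
      simp
  · rintro ⟨m, rest, hs⟩
    refine ⟨['_'].intercalate (('l' :: m) :: rest), ?_, ?_⟩
    · rw [hs]
      congr 1
      refine (List.splitOn_intercalate _ '_' ?_ (by simp)).symm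
      intro l hl
      have : l ∈ pre.splitOn '_' := by rw [hs]; exact List.mem_cons_of_mem _ hl
      exact pv_no_sep pre l this
    · obtain ⟨X, hX⟩ := pv_J m rest
      rw [hX]
      exact ⟨X, rfl⟩

-- shape of the token list when a 3-token decomposed prefix matches
theorem pv_shape3 (t1 t2 t3 pre : List Char)
    (h1 : '_' ∉ t1) (h2 : '_' ∉ t2) (h3 : '_' ∉ t3) :
    ((t1 ++ '_' :: (t2 ++ '_' :: (t3 ++ ['_', 'l']))) <+: pre) ↔
      ∃ m rest, pre.splitOn '_' = t1 :: t2 :: t3 :: ('l' :: m) :: rest := by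
  rw [pv_peel t1 _ pre h1]
  constructor
  · rintro ⟨q1, hq1, hw1⟩
    rw [pv_peel t2 _ q1 h2] at hw1
    obtain ⟨q2, hq2, hw2⟩ := hw1
    rw [pv_shape1 t3 q2 h3] at hw2
    obtain ⟨m, rest, hs⟩ := hw2
    exact ⟨m, rest, by rw [hq1, hq2, hs]⟩
  · rintro ⟨m, rest, hs⟩
    have hfree : ∀ l ∈ (t2 :: t3 :: ('l' :: m) :: rest : List (List Char)), '_' ∉ l := by
      intro l hl
      have : l ∈ pre.splitOn '_' := by rw [hs]; exact List.mem_cons_of_mem _ hl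
      exact pv_no_sep pre l this
    refine ⟨['_'].intercalate (t2 :: t3 :: ('l' :: m) :: rest), ?_, ?_⟩
    · rw [hs]
      congr 1
      exact (List.splitOn_intercalate _ '_' hfree (by simp)).symm
    · rw [pv_peel t2 _ _ h2]
      refine ⟨['_'].intercalate (t3 :: ('l' :: m) :: rest), ?_, ?_⟩
      · rw [pv_ic_cons₂, pv_splitOn_append t2 _ h2]
      · rw [pv_shape1 t3 _ h3]
        refine ⟨m, rest, ?_⟩
        refine List.splitOn_intercalate _ '_' ?_ (by simp)
        intro l hl
        exact hfree l (List.mem_cons_of_mem _ hl)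

-- literal decompositions of the five dict prefixes
theorem pv_e1 : ("energy_l".toList : List Char) = "energy".toList ++ ['_', 'l'] := by decide
theorem pv_e2 : ("forces_l".toList : List Char) = "forces".toList ++ ['_', 'l'] := by decide
theorem pv_e4 : ("stress_l".toList : List Char) = "stress".toList ++ ['_', 'l'] := by decide

-- each loop condition, as a token-shape condition on the stem
theorem pv_c1 (pre : List Char) :
    PySem.Chars.startswith (pre ++ ['_','v','a','r']) "energy_l".toList = true ↔
      ∃ m rest, pre.splitOn '_' = "energy".toList :: ('l' :: m) :: rest := by
  rw [pv_e1, pv_startA, decide_eq_true_eq]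
  exact pv_shape1 _ pre (by decide)

theorem pv_c2 (pre : List Char) :
    PySem.Chars.startswith (pre ++ ['_','v','a','r']) "forces_l".toList = true ↔
      ∃ m rest, pre.splitOn '_' = "forces".toList :: ('l' :: m) :: rest := by
  rw [pv_e2, pv_startA, decide_eq_true_eq]
  exact pv_shape1 _ pre (by decide)

theorem pv_c4 (pre : List Char) :
    PySem.Chars.startswith (pre ++ ['_','v','a','r']) "stress_l".toList = true ↔
      ∃ m rest, pre.splitOn '_' = "stress".toList :: ('l' :: m) :: rest := by
  rw [pv_e4, pv_startA, decide_eq_true_eq]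
  exact pv_shape1 _ pre (by decide)

theorem pv_c3 (pre : List Char) :
    PySem.Chars.startswith (pre ++ ['_','v','a','r']) "non_conservative_forces_l".toList = true ↔
      ∃ m rest, pre.splitOn '_' =
        "non".toList :: "conservative".toList :: "forces".toList :: ('l' :: m) :: rest := by
  rw [show ("non_conservative_forces_l".toList : List Char) =
        "non_conservative_forces".toList ++ ['_', 'l'] by decide, pv_startA, decide_eq_true_eq]
  rw [show ("non_conservative_forces".toList : List Char) ++ ['_', 'l'] =
        "non".toList ++ '_' :: ("conservative".toList ++ '_' :: ("forces".toList ++ ['_', 'l']))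
      by decide]
  exact pv_shape3 _ _ _ pre (by decide) (by decide) (by decide)

theorem pv_c5 (pre : List Char) :
    PySem.Chars.startswith (pre ++ ['_','v','a','r']) "non_conservative_stress_l".toList = true ↔
      ∃ m rest, pre.splitOn '_' =
        "non".toList :: "conservative".toList :: "stress".toList :: ('l' :: m) :: rest := by
  rw [show ("non_conservative_stress_l".toList : List Char) =
        "non_conservative_stress".toList ++ ['_', 'l'] by decide, pv_startA, decide_eq_true_eq]
  rw [show ("non_conservative_stress".toList : List Char) ++ ['_', 'l'] =
        "non".toList ++ '_' :: ("conservative".toList ++ '_' :: ("stress".toList ++ ['_', 'l']))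
      by decide]
  exact pv_shape3 _ _ _ pre (by decide) (by decide) (by decide)

-- slicing off the leading 'l' of the joined tail
theorem pv_slice_one (X : List Char) :
    PySem.List.slice ('l' :: X) (some 1) none = X := by
  rw [PySem.List.slice_from ('l' :: X) (by omega : (0:Int) ≤ 1)]
  simp

-- the stem, reconstructed from its token shape (1-token target)
theorem pv_recon1 (t pre m : List Char) (rest : List (List Char)) (X : List Char)
    (hs : pre.splitOn '_' = t :: ('l' :: m) :: rest)
    (hX : ['_'].intercalate (('l' :: m) :: rest) = 'l' :: X) :
    pre = (t ++ ['_', 'l']) ++ X := by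
  have h1 : ['_'].intercalate (pre.splitOn '_') = pre := List.intercalate_splitOn pre '_'
  rw [hs, pv_ic_cons₂, hX] at h1
  rw [← h1]
  simp

-- the stem, reconstructed from its token shape (3-token target)
theorem pv_recon3 (t1 t2 t3 pre m : List Char) (rest : List (List Char)) (X : List Char)
    (hs : pre.splitOn '_' = t1 :: t2 :: t3 :: ('l' :: m) :: rest)
    (hX : ['_'].intercalate (('l' :: m) :: rest) = 'l' :: X) :
    pre = ((t1 ++ '_' :: (t2 ++ '_' :: t3)) ++ ['_', 'l']) ++ X := by
  have h1 : ['_'].intercalate (pre.splitOn '_') = pre := List.intercalate_splitOn pre '_'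
  rw [hs, pv_ic_cons₂, pv_ic_cons₂, pv_ic_cons₂, hX] at h1
  rw [← h1]
  simp

-- ---------- A-loop evaluation helpers ----------

theorem pv_loop_first (vk pas block : List Char) (pre tgt : List Char)
    (rest : List (List Char × List Char))
    (h : (PySem.Chars.startswith vk pre && PySem.Chars.endswith vk "_var".toList) = true) :
    pvALoop vk pas block ((pre, tgt) :: rest) =
      some (tgt ++ " L".toList ++ PySem.List.slice vk (some (pre.length : Int)) (some (-4)) ++
            " std".toList ++ pas ++ block) := by
  simp only [pvALoop]
  rw [h]
  simp

theorem pv_loop_skip (vk pas block : List Char) (pre tgt : List Char)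
    (rest : List (List Char × List Char))
    (h : PySem.Chars.startswith vk pre = false) :
    pvALoop vk pas block ((pre, tgt) :: rest) = pvALoop vk pas block rest := by
  simp [pvALoop, h]

theorem pv_loopA_none (pre pas block : List Char)
    (n1 : ¬ ∃ m rest, pre.splitOn '_' = "energy".toList :: ('l' :: m) :: rest)
    (n2 : ¬ ∃ m rest, pre.splitOn '_' = "forces".toList :: ('l' :: m) :: rest)
    (n3 : ¬ ∃ m rest, pre.splitOn '_' =
        "non".toList :: "conservative".toList :: "forces".toList :: ('l' :: m) :: rest)
    (n4 : ¬ ∃ m rest, pre.splitOn '_' = "stress".toList :: ('l' :: m) :: rest)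
    (n5 : ¬ ∃ m rest, pre.splitOn '_' =
        "non".toList :: "conservative".toList :: "stress".toList :: ('l' :: m) :: rest) :
    pvALoop (pre ++ ['_','v','a','r']) pas block pvAPrefixes = none := by
  have s1 : PySem.Chars.startswith (pre ++ ['_','v','a','r']) "energy_l".toList = false :=
    Bool.eq_false_iff.2 (fun h => n1 ((pv_c1 pre).1 h))
  have s2 : PySem.Chars.startswith (pre ++ ['_','v','a','r']) "forces_l".toList = false :=
    Bool.eq_false_iff.2 (fun h => n2 ((pv_c2 pre).1 h))
  have s3 : PySem.Chars.startswith (pre ++ ['_','v','a','r']) "non_conservative_forces_l".toList = false :=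
    Bool.eq_false_iff.2 (fun h => n3 ((pv_c3 pre).1 h))
  have s4 : PySem.Chars.startswith (pre ++ ['_','v','a','r']) "stress_l".toList = false :=
    Bool.eq_false_iff.2 (fun h => n4 ((pv_c4 pre).1 h))
  have s5 : PySem.Chars.startswith (pre ++ ['_','v','a','r']) "non_conservative_stress_l".toList = false :=
    Bool.eq_false_iff.2 (fun h => n5 ((pv_c5 pre).1 h))
  unfold pvAPrefixes
  rw [pv_loop_skip _ _ _ _ _ _ s1, pv_loop_skip _ _ _ _ _ _ s2, pv_loop_skip _ _ _ _ _ _ s3,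
      pv_loop_skip _ _ _ _ _ _ s4, pv_loop_skip _ _ _ _ _ _ s5]
  rfl

-- ---------- the two matched-leaf computations ----------

theorem pv_leaf1 (t pre m : List Char) (rest : List (List Char)) (pas block : List Char) (n : Int)
    (h0 : pre.splitOn '_' = t :: ('l' :: m) :: rest)
    (hnon : t ≠ "non".toList)
    (hT1 : pvBTargets.contains t = true)
    (hn : n = ((t ++ ['_', 'l']).length : Int))
    (hL : pvALoop (pre ++ ['_','v','a','r']) pas block pvAPrefixes =
      some (t ++ " L".toList ++
        PySem.List.slice (pre ++ ['_','v','a','r']) (some n) (some (-4)) ++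
        " std".toList ++ pas ++ block)) :
    (match pvALoop (pre ++ ['_','v','a','r']) pas block pvAPrefixes with
     | some r => r
     | none => pre ++ " std".toList ++ pas ++ block) = (if (decide ((if (pre.splitOn '_').take 2 = ["non".toList, "conservative".toList] then 3 else 1) < (pre.splitOn '_').length) &&
        PySem.Chars.startswith ((pre.splitOn '_').getD (if (pre.splitOn '_').take 2 = ["non".toList, "conservative".toList] then 3 else 1) []) "l".toList &&
        pvBTargets.contains (PySem.Chars.join "_".toList ((pre.splitOn '_').take (if (pre.splitOn '_').take 2 = ["non".toList, "conservative".toList] then 3 else 1)))) = true then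
      PySem.Chars.join "_".toList ((pre.splitOn '_').take (if (pre.splitOn '_').take 2 = ["non".toList, "conservative".toList] then 3 else 1)) ++ " L".toList ++
        PySem.List.slice (PySem.Chars.join "_".toList ((pre.splitOn '_').drop (if (pre.splitOn '_').take 2 = ["non".toList, "conservative".toList] then 3 else 1))) (some 1) none ++
        " std".toList ++ pas ++ block
    else pre ++ " std".toList ++ pas ++ block) := by
  obtain ⟨X, hX⟩ := pv_J m rest
  have hpre : pre = (t ++ ['_', 'l']) ++ X := pv_recon1 t pre m rest X h0 hX
  have hkne : ¬ ((pre.splitOn '_').take 2 = ["non".toList, "conservative".toList]) := by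
    rw [h0]
    simp only [List.take_succ_cons, List.take_zero]
    intro hc
    simp only [List.cons.injEq] at hc
    exact hnon hc.1
  rw [hL]
  rw [if_neg hkne, h0]
  have hlen : decide (1 < (t :: ('l' :: m) :: rest).length) = true :=
    decide_eq_true (by simp)
  have hsw : PySem.Chars.startswith ('l' :: m) "l".toList = true := by
    rw [show ("l".toList : List Char) = ['l'] by decide]
    exact (PySem.Chars.startswith_iff _ _).2 ⟨m, rfl⟩
  have hj1 : PySem.Chars.join "_".toList ((t :: ('l' :: m) :: rest).take 1) = t := by
    show PySem.Chars.join "_".toList [t] = t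
    rw [show PySem.Chars.join "_".toList [t] = ['_'].intercalate [t] from rfl]
    exact pv_ic_single t
  have hjd : PySem.Chars.join "_".toList ((t :: ('l' :: m) :: rest).drop 1) = 'l' :: X := by
    show PySem.Chars.join "_".toList (('l' :: m) :: rest) = 'l' :: X
    rw [show PySem.Chars.join "_".toList (('l' :: m) :: rest) =
          ['_'].intercalate (('l' :: m) :: rest) from rfl]
    exact hX
  have hgetD : (t :: ('l' :: m) :: rest).getD 1 [] = 'l' :: m := rfl
  rw [hj1, hjd, hgetD, hsw, hlen, hT1]
  simp only [Bool.and_self]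
  rw [if_pos trivial]
  rw [pv_slice_one]
  show t ++ " L".toList ++ PySem.List.slice (pre ++ ['_','v','a','r']) (some n) (some (-4)) ++
      " std".toList ++ pas ++ block = t ++ " L".toList ++ X ++ " std".toList ++ pas ++ block
  rw [hpre, pv_slice_mid (t ++ ['_', 'l']) X n hn]

theorem pv_join3 (t2 : List Char) :
    PySem.Chars.join "_".toList ["non".toList, "conservative".toList, t2] =
      "non".toList ++ '_' :: ("conservative".toList ++ '_' :: t2) := by
  rw [show PySem.Chars.join "_".toList ["non".toList, "conservative".toList, t2] =
        ['_'].intercalate ["non".toList, "conservative".toList, t2] from rfl]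
  rw [pv_ic_cons₂, pv_ic_cons₂, pv_ic_single]

theorem pv_leaf3 (t2 pre m : List Char) (rest : List (List Char)) (pas block tgt : List Char)
    (n : Int)
    (h0 : pre.splitOn '_' =
      "non".toList :: "conservative".toList :: t2 :: ('l' :: m) :: rest)
    (htgt : tgt = "non".toList ++ '_' :: ("conservative".toList ++ '_' :: t2))
    (hn : n = ((tgt ++ ['_', 'l']).length : Int))
    (hT : pvBTargets.contains tgt = true)
    (hL : pvALoop (pre ++ ['_','v','a','r']) pas block pvAPrefixes =
      some (tgt ++ " L".toList ++
        PySem.List.slice (pre ++ ['_','v','a','r']) (some n) (some (-4)) ++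
        " std".toList ++ pas ++ block)) :
    (match pvALoop (pre ++ ['_','v','a','r']) pas block pvAPrefixes with
     | some r => r
     | none => pre ++ " std".toList ++ pas ++ block) = (if (decide ((if (pre.splitOn '_').take 2 = ["non".toList, "conservative".toList] then 3 else 1) < (pre.splitOn '_').length) &&
        PySem.Chars.startswith ((pre.splitOn '_').getD (if (pre.splitOn '_').take 2 = ["non".toList, "conservative".toList] then 3 else 1) []) "l".toList &&
        pvBTargets.contains (PySem.Chars.join "_".toList ((pre.splitOn '_').take (if (pre.splitOn '_').take 2 = ["non".toList, "conservative".toList] then 3 else 1)))) = true then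
      PySem.Chars.join "_".toList ((pre.splitOn '_').take (if (pre.splitOn '_').take 2 = ["non".toList, "conservative".toList] then 3 else 1)) ++ " L".toList ++
        PySem.List.slice (PySem.Chars.join "_".toList ((pre.splitOn '_').drop (if (pre.splitOn '_').take 2 = ["non".toList, "conservative".toList] then 3 else 1))) (some 1) none ++
        " std".toList ++ pas ++ block
    else pre ++ " std".toList ++ pas ++ block) := by
  obtain ⟨X, hX⟩ := pv_J m rest
  have hpre : pre = (tgt ++ ['_', 'l']) ++ X := by
    rw [htgt]
    exact pv_recon3 _ _ _ pre m rest X h0 hX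
  have hkeq : (pre.splitOn '_').take 2 = ["non".toList, "conservative".toList] := by
    rw [h0]
    rfl
  rw [hL]
  rw [if_pos hkeq, h0]
  have hlen : decide (3 <
      ("non".toList :: "conservative".toList :: t2 :: ('l' :: m) :: rest).length) = true :=
    decide_eq_true (by simp)
  have hsw : PySem.Chars.startswith ('l' :: m) "l".toList = true := by
    rw [show ("l".toList : List Char) = ['l'] by decide]
    exact (PySem.Chars.startswith_iff _ _).2 ⟨m, rfl⟩
  have hj1 : PySem.Chars.join "_".toList
      (("non".toList :: "conservative".toList :: t2 :: ('l' :: m) :: rest).take 3) = tgt := by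
    show PySem.Chars.join "_".toList ["non".toList, "conservative".toList, t2] = tgt
    rw [pv_join3, htgt]
  have hjd : PySem.Chars.join "_".toList
      (("non".toList :: "conservative".toList :: t2 :: ('l' :: m) :: rest).drop 3) = 'l' :: X := by
    show PySem.Chars.join "_".toList (('l' :: m) :: rest) = 'l' :: X
    rw [show PySem.Chars.join "_".toList (('l' :: m) :: rest) =
          ['_'].intercalate (('l' :: m) :: rest) from rfl]
    exact hX
  have hgetD : ("non".toList :: "conservative".toList :: t2 :: ('l' :: m) :: rest).getD 3 []
      = 'l' :: m := rfl
  rw [hj1, hjd, hgetD, hsw, hlen, hT]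
  simp only [Bool.and_self]
  rw [if_pos trivial]
  rw [pv_slice_one]
  show tgt ++ " L".toList ++ PySem.List.slice (pre ++ ['_','v','a','r']) (some n) (some (-4)) ++
      " std".toList ++ pas ++ block = tgt ++ " L".toList ++ X ++ " std".toList ++ pas ++ block
  rw [hpre, pv_slice_mid (tgt ++ ['_', 'l']) X n hn]

-- ===== the main stem lemma: both endswith-"_var" branches agree =====
theorem pv_tail (pre pas block : List Char) :
    (match pvALoop (pre ++ ['_','v','a','r']) pas block pvAPrefixes with
     | some r => r
     | none => pre ++ " std".toList ++ pas ++ block) = (if (decide ((if (pre.splitOn '_').take 2 = ["non".toList, "conservative".toList] then 3 else 1) < (pre.splitOn '_').length) &&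
        PySem.Chars.startswith ((pre.splitOn '_').getD (if (pre.splitOn '_').take 2 = ["non".toList, "conservative".toList] then 3 else 1) []) "l".toList &&
        pvBTargets.contains (PySem.Chars.join "_".toList ((pre.splitOn '_').take (if (pre.splitOn '_').take 2 = ["non".toList, "conservative".toList] then 3 else 1)))) = true then
      PySem.Chars.join "_".toList ((pre.splitOn '_').take (if (pre.splitOn '_').take 2 = ["non".toList, "conservative".toList] then 3 else 1)) ++ " L".toList ++
        PySem.List.slice (PySem.Chars.join "_".toList ((pre.splitOn '_').drop (if (pre.splitOn '_').take 2 = ["non".toList, "conservative".toList] then 3 else 1))) (some 1) none ++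
        " std".toList ++ pas ++ block
    else pre ++ " std".toList ++ pas ++ block) := by
  by_cases hk : (pre.splitOn '_').take 2 = ["non".toList, "conservative".toList]
  case pos =>
    obtain ⟨ts, hts⟩ : ∃ ts, pre.splitOn '_' = "non".toList :: "conservative".toList :: ts := by
      rcases h0 : pre.splitOn '_' with - | ⟨a, - | ⟨b, ts⟩⟩
      · rw [h0] at hk; simp at hk
      · rw [h0] at hk; simp at hk
      · rw [h0] at hk
        simp only [List.take_succ_cons, List.take_zero, List.cons.injEq, and_true] at hk
        exact ⟨ts, by rw [hk.1, hk.2]⟩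
    rcases ts with - | ⟨t2, - | ⟨t3, ts'⟩⟩
    · -- tokens = [non, conservative]: too short, nothing matches
      have n1 : ¬ ∃ m rest, pre.splitOn '_' = "energy".toList :: ('l' :: m) :: rest := by
        rintro ⟨m, r, hc⟩
        exact absurd (List.cons.inj (hts.symm.trans hc)).1 (by decide)
      have n2 : ¬ ∃ m rest, pre.splitOn '_' = "forces".toList :: ('l' :: m) :: rest := by
        rintro ⟨m, r, hc⟩
        exact absurd (List.cons.inj (hts.symm.trans hc)).1 (by decide)
      have n4 : ¬ ∃ m rest, pre.splitOn '_' = "stress".toList :: ('l' :: m) :: rest := by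
        rintro ⟨m, r, hc⟩
        exact absurd (List.cons.inj (hts.symm.trans hc)).1 (by decide)
      have n3 : ¬ ∃ m rest, pre.splitOn '_' =
          "non".toList :: "conservative".toList :: "forces".toList :: ('l' :: m) :: rest := by
        rintro ⟨m, r, hc⟩
        have hlen := congrArg List.length (hts.symm.trans hc)
        simp only [List.length_cons, List.length_nil] at hlen
        omega
      have n5 : ¬ ∃ m rest, pre.splitOn '_' =
          "non".toList :: "conservative".toList :: "stress".toList :: ('l' :: m) :: rest := by
        rintro ⟨m, r, hc⟩
        have hlen := congrArg List.length (hts.symm.trans hc)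
        simp only [List.length_cons, List.length_nil] at hlen
        omega
      rw [pv_loopA_none pre pas block n1 n2 n3 n4 n5]
      rw [if_pos hk, hts]
      simp
    · -- tokens = [non, conservative, t2]: still too short for the 3-token targets
      have n1 : ¬ ∃ m rest, pre.splitOn '_' = "energy".toList :: ('l' :: m) :: rest := by
        rintro ⟨m, r, hc⟩
        exact absurd (List.cons.inj (hts.symm.trans hc)).1 (by decide)
      have n2 : ¬ ∃ m rest, pre.splitOn '_' = "forces".toList :: ('l' :: m) :: rest := by
        rintro ⟨m, r, hc⟩
        exact absurd (List.cons.inj (hts.symm.trans hc)).1 (by decide)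
      have n4 : ¬ ∃ m rest, pre.splitOn '_' = "stress".toList :: ('l' :: m) :: rest := by
        rintro ⟨m, r, hc⟩
        exact absurd (List.cons.inj (hts.symm.trans hc)).1 (by decide)
      have n3 : ¬ ∃ m rest, pre.splitOn '_' =
          "non".toList :: "conservative".toList :: "forces".toList :: ('l' :: m) :: rest := by
        rintro ⟨m, r, hc⟩
        have hlen := congrArg List.length (hts.symm.trans hc)
        simp only [List.length_cons, List.length_nil] at hlen
        omega
      have n5 : ¬ ∃ m rest, pre.splitOn '_' =
          "non".toList :: "conservative".toList :: "stress".toList :: ('l' :: m) :: rest := by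
        rintro ⟨m, r, hc⟩
        have hlen := congrArg List.length (hts.symm.trans hc)
        simp only [List.length_cons, List.length_nil] at hlen
        omega
      rw [pv_loopA_none pre pas block n1 n2 n3 n4 n5]
      rw [if_pos hk, hts]
      simp
    · -- tokens = non :: conservative :: t2 :: t3 :: ts'
      by_cases hsh : (∃ m, t3 = 'l' :: m) ∧
          (t2 = "forces".toList ∨ t2 = "stress".toList)
      case pos =>
        obtain ⟨⟨m, rfl⟩, ht2⟩ := hsh
        have s1 : PySem.Chars.startswith (pre ++ ['_','v','a','r']) "energy_l".toList = false := by
          rw [Bool.eq_false_iff]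
          intro h
          obtain ⟨m', r', hc⟩ := (pv_c1 pre).1 h
          exact absurd (List.cons.inj (hts.symm.trans hc)).1 (by decide)
        have s2 : PySem.Chars.startswith (pre ++ ['_','v','a','r']) "forces_l".toList = false := by
          rw [Bool.eq_false_iff]
          intro h
          obtain ⟨m', r', hc⟩ := (pv_c2 pre).1 h
          exact absurd (List.cons.inj (hts.symm.trans hc)).1 (by decide)
        rcases ht2 with rfl | rfl
        · -- non_conservative_forces
          have hst : PySem.Chars.startswith (pre ++ ['_','v','a','r'])
              "non_conservative_forces_l".toList = true := (pv_c3 pre).2 ⟨m, ts', hts⟩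
          have hcond : (PySem.Chars.startswith (pre ++ ['_','v','a','r'])
              "non_conservative_forces_l".toList &&
              PySem.Chars.endswith (pre ++ ['_','v','a','r']) "_var".toList) = true := by
            rw [hst, pv_endsA]; rfl
          have hL : pvALoop (pre ++ ['_','v','a','r']) pas block pvAPrefixes =
              some ("non_conservative_forces".toList ++ " L".toList ++
                PySem.List.slice (pre ++ ['_','v','a','r'])
                  (some (("non_conservative_forces_l".toList.length : Nat) : Int)) (some (-4)) ++
                " std".toList ++ pas ++ block) := by
            unfold pvAPrefixes
            rw [pv_loop_skip _ _ _ _ _ _ s1, pv_loop_skip _ _ _ _ _ _ s2]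
            exact pv_loop_first _ _ _ _ _ _ hcond
          exact pv_leaf3 _ pre m ts' pas block "non_conservative_forces".toList _ hts
            (by decide) (by decide) (by decide) hL
        · -- non_conservative_stress
          have s3 : PySem.Chars.startswith (pre ++ ['_','v','a','r'])
              "non_conservative_forces_l".toList = false := by
            rw [Bool.eq_false_iff]
            intro h
            obtain ⟨m', r', hc⟩ := (pv_c3 pre).1 h
            have hcc := hts.symm.trans hc
            have h3 := (List.cons.inj (List.cons.inj hcc).2).2
            exact absurd (List.cons.inj h3).1 (by decide)
          have s4 : PySem.Chars.startswith (pre ++ ['_','v','a','r'])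
              "stress_l".toList = false := by
            rw [Bool.eq_false_iff]
            intro h
            obtain ⟨m', r', hc⟩ := (pv_c4 pre).1 h
            exact absurd (List.cons.inj (hts.symm.trans hc)).1 (by decide)
          have hst : PySem.Chars.startswith (pre ++ ['_','v','a','r'])
              "non_conservative_stress_l".toList = true := (pv_c5 pre).2 ⟨m, ts', hts⟩
          have hcond : (PySem.Chars.startswith (pre ++ ['_','v','a','r'])
              "non_conservative_stress_l".toList &&
              PySem.Chars.endswith (pre ++ ['_','v','a','r']) "_var".toList) = true := by
            rw [hst, pv_endsA]; rfl
          have hL : pvALoop (pre ++ ['_','v','a','r']) pas block pvAPrefixes =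
              some ("non_conservative_stress".toList ++ " L".toList ++
                PySem.List.slice (pre ++ ['_','v','a','r'])
                  (some (("non_conservative_stress_l".toList.length : Nat) : Int)) (some (-4)) ++
                " std".toList ++ pas ++ block) := by
            unfold pvAPrefixes
            rw [pv_loop_skip _ _ _ _ _ _ s1, pv_loop_skip _ _ _ _ _ _ s2,
                pv_loop_skip _ _ _ _ _ _ s3, pv_loop_skip _ _ _ _ _ _ s4]
            exact pv_loop_first _ _ _ _ _ _ hcond
          exact pv_leaf3 _ pre m ts' pas block "non_conservative_stress".toList _ hts
            (by decide) (by decide) (by decide) hL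
      case neg =>
        have n1 : ¬ ∃ m rest, pre.splitOn '_' = "energy".toList :: ('l' :: m) :: rest := by
          rintro ⟨m, r, hc⟩
          exact absurd (List.cons.inj (hts.symm.trans hc)).1 (by decide)
        have n2 : ¬ ∃ m rest, pre.splitOn '_' = "forces".toList :: ('l' :: m) :: rest := by
          rintro ⟨m, r, hc⟩
          exact absurd (List.cons.inj (hts.symm.trans hc)).1 (by decide)
        have n4 : ¬ ∃ m rest, pre.splitOn '_' = "stress".toList :: ('l' :: m) :: rest := by
          rintro ⟨m, r, hc⟩
          exact absurd (List.cons.inj (hts.symm.trans hc)).1 (by decide)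
        have n3 : ¬ ∃ m rest, pre.splitOn '_' =
            "non".toList :: "conservative".toList :: "forces".toList :: ('l' :: m) :: rest := by
          rintro ⟨m, r, hc⟩
          have hcc := hts.symm.trans hc
          have h3 := (List.cons.inj (List.cons.inj hcc).2).2
          have h4 := (List.cons.inj (List.cons.inj h3).2).1
          exact hsh ⟨⟨m, h4⟩, Or.inl (List.cons.inj h3).1⟩
        have n5 : ¬ ∃ m rest, pre.splitOn '_' =
            "non".toList :: "conservative".toList :: "stress".toList :: ('l' :: m) :: rest := by
          rintro ⟨m, r, hc⟩
          have hcc := hts.symm.trans hc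
          have h3 := (List.cons.inj (List.cons.inj hcc).2).2
          have h4 := (List.cons.inj (List.cons.inj h3).2).1
          exact hsh ⟨⟨m, h4⟩, Or.inr (List.cons.inj h3).1⟩
        rw [pv_loopA_none pre pas block n1 n2 n3 n4 n5]
        rw [if_pos hk, hts]
        have hfalse : (decide (3 <
              ("non".toList :: "conservative".toList :: t2 :: t3 :: ts').length) &&
            PySem.Chars.startswith
              (("non".toList :: "conservative".toList :: t2 :: t3 :: ts').getD 3 []) "l".toList &&
            pvBTargets.contains (PySem.Chars.join "_".toList
              (("non".toList :: "conservative".toList :: t2 :: t3 :: ts').take 3))) = false := by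
          rw [Bool.eq_false_iff]
          intro htrue
          rw [Bool.and_eq_true, Bool.and_eq_true] at htrue
          obtain ⟨⟨-, hsw⟩, hcont⟩ := htrue
          rw [show (("non".toList :: "conservative".toList :: t2 :: t3 :: ts').getD 3 [] :
                List Char) = t3 from rfl,
              show ("l".toList : List Char) = ['l'] by decide] at hsw
          obtain ⟨u, hu⟩ := (PySem.Chars.startswith_iff _ _).1 hsw
          rw [show (("non".toList :: "conservative".toList :: t2 :: t3 :: ts').take 3 :
                List (List Char)) = ["non".toList, "conservative".toList, t2] from rfl,
              pv_join3] at hcont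
          have hmem := List.contains_iff_mem.1 hcont
          simp only [pvBTargets, List.mem_cons, List.not_mem_nil, or_false] at hmem
          have hne3 : t3 = 'l' :: u := hu.symm
          rcases hmem with hEq | hEq | hEq | hEq | hEq
          · have hlen := congrArg List.length hEq
            simp at hlen
          · have hlen := congrArg List.length hEq
            simp at hlen
          · have hlen := congrArg List.length hEq
            simp at hlen
          · rw [show ("non_conservative_forces".toList : List Char) =
                  "non".toList ++ '_' :: ("conservative".toList ++ '_' :: "forces".toList)
                by decide] at hEq
            have h1 := (List.cons.inj (List.append_cancel_left hEq)).2
            have h2 := (List.cons.inj (List.append_cancel_left h1)).2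
            exact hsh ⟨⟨u, hne3⟩, Or.inl h2⟩
          · rw [show ("non_conservative_stress".toList : List Char) =
                  "non".toList ++ '_' :: ("conservative".toList ++ '_' :: "stress".toList)
                by decide] at hEq
            have h1 := (List.cons.inj (List.append_cancel_left hEq)).2
            have h2 := (List.cons.inj (List.append_cancel_left h1)).2
            exact hsh ⟨⟨u, hne3⟩, Or.inr h2⟩
        rw [hfalse]
        simp
  case neg =>
    rcases h0 : pre.splitOn '_' with - | ⟨t0, - | ⟨t1, rest⟩⟩
    · exact absurd h0 (List.splitOnP_ne_nil _ pre)
    · -- a single token: nothing matches, and len = 1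
      rw [← h0]
      have n1 : ¬ ∃ m rest, pre.splitOn '_' = "energy".toList :: ('l' :: m) :: rest := by
        rintro ⟨m, r, hc⟩
        have hlen := congrArg List.length (h0.symm.trans hc)
        simp only [List.length_cons, List.length_nil] at hlen
        omega
      have n2 : ¬ ∃ m rest, pre.splitOn '_' = "forces".toList :: ('l' :: m) :: rest := by
        rintro ⟨m, r, hc⟩
        have hlen := congrArg List.length (h0.symm.trans hc)
        simp only [List.length_cons, List.length_nil] at hlen
        omega
      have n4 : ¬ ∃ m rest, pre.splitOn '_' = "stress".toList :: ('l' :: m) :: rest := by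
        rintro ⟨m, r, hc⟩
        have hlen := congrArg List.length (h0.symm.trans hc)
        simp only [List.length_cons, List.length_nil] at hlen
        omega
      have n3 : ¬ ∃ m rest, pre.splitOn '_' =
          "non".toList :: "conservative".toList :: "forces".toList :: ('l' :: m) :: rest := by
        rintro ⟨m, r, hc⟩
        have hlen := congrArg List.length (h0.symm.trans hc)
        simp only [List.length_cons, List.length_nil] at hlen
        omega
      have n5 : ¬ ∃ m rest, pre.splitOn '_' =
          "non".toList :: "conservative".toList :: "stress".toList :: ('l' :: m) :: rest := by
        rintro ⟨m, r, hc⟩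
        have hlen := congrArg List.length (h0.symm.trans hc)
        simp only [List.length_cons, List.length_nil] at hlen
        omega
      rw [pv_loopA_none pre pas block n1 n2 n3 n4 n5]
      rw [if_neg hk, h0]
      simp
    · -- at least two tokens, k = 1
      rw [← h0]
      by_cases hsh : (∃ m, t1 = 'l' :: m) ∧ (t0 = "energy".toList ∨ t0 = "forces".toList ∨
          t0 = "stress".toList)
      case pos =>
        obtain ⟨⟨m, rfl⟩, ht0⟩ := hsh
        rcases ht0 with rfl | rfl | rfl
        · -- energy
          have hst : PySem.Chars.startswith (pre ++ ['_','v','a','r']) "energy_l".toList = true :=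
            (pv_c1 pre).2 ⟨m, rest, h0⟩
          have hcond : (PySem.Chars.startswith (pre ++ ['_','v','a','r']) "energy_l".toList &&
              PySem.Chars.endswith (pre ++ ['_','v','a','r']) "_var".toList) = true := by
            rw [hst, pv_endsA]; rfl
          have hL : pvALoop (pre ++ ['_','v','a','r']) pas block pvAPrefixes =
              some ("energy".toList ++ " L".toList ++
                PySem.List.slice (pre ++ ['_','v','a','r'])
                  (some (("energy_l".toList.length : Nat) : Int)) (some (-4)) ++
                " std".toList ++ pas ++ block) := by
            unfold pvAPrefixes
            exact pv_loop_first _ _ _ _ _ _ hcond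
          exact pv_leaf1 _ pre m rest pas block _ h0 (by decide) (by decide) (by decide) hL
        · -- forces
          have s1 : PySem.Chars.startswith (pre ++ ['_','v','a','r']) "energy_l".toList = false := by
            rw [Bool.eq_false_iff]
            intro h
            obtain ⟨m', r', hc⟩ := (pv_c1 pre).1 h
            exact absurd (List.cons.inj (h0.symm.trans hc)).1 (by decide)
          have hst : PySem.Chars.startswith (pre ++ ['_','v','a','r']) "forces_l".toList = true :=
            (pv_c2 pre).2 ⟨m, rest, h0⟩
          have hcond : (PySem.Chars.startswith (pre ++ ['_','v','a','r']) "forces_l".toList &&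
              PySem.Chars.endswith (pre ++ ['_','v','a','r']) "_var".toList) = true := by
            rw [hst, pv_endsA]; rfl
          have hL : pvALoop (pre ++ ['_','v','a','r']) pas block pvAPrefixes =
              some ("forces".toList ++ " L".toList ++
                PySem.List.slice (pre ++ ['_','v','a','r'])
                  (some (("forces_l".toList.length : Nat) : Int)) (some (-4)) ++
                " std".toList ++ pas ++ block) := by
            unfold pvAPrefixes
            rw [pv_loop_skip _ _ _ _ _ _ s1]
            exact pv_loop_first _ _ _ _ _ _ hcond
          exact pv_leaf1 _ pre m rest pas block _ h0 (by decide) (by decide) (by decide) hL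
        · -- stress
          have s1 : PySem.Chars.startswith (pre ++ ['_','v','a','r']) "energy_l".toList = false := by
            rw [Bool.eq_false_iff]
            intro h
            obtain ⟨m', r', hc⟩ := (pv_c1 pre).1 h
            exact absurd (List.cons.inj (h0.symm.trans hc)).1 (by decide)
          have s2 : PySem.Chars.startswith (pre ++ ['_','v','a','r']) "forces_l".toList = false := by
            rw [Bool.eq_false_iff]
            intro h
            obtain ⟨m', r', hc⟩ := (pv_c2 pre).1 h
            exact absurd (List.cons.inj (h0.symm.trans hc)).1 (by decide)
          have s3 : PySem.Chars.startswith (pre ++ ['_','v','a','r'])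
              "non_conservative_forces_l".toList = false := by
            rw [Bool.eq_false_iff]
            intro h
            obtain ⟨m', r', hc⟩ := (pv_c3 pre).1 h
            exact absurd (List.cons.inj (h0.symm.trans hc)).1 (by decide)
          have hst : PySem.Chars.startswith (pre ++ ['_','v','a','r']) "stress_l".toList = true :=
            (pv_c4 pre).2 ⟨m, rest, h0⟩
          have hcond : (PySem.Chars.startswith (pre ++ ['_','v','a','r']) "stress_l".toList &&
              PySem.Chars.endswith (pre ++ ['_','v','a','r']) "_var".toList) = true := by
            rw [hst, pv_endsA]; rfl
          have hL : pvALoop (pre ++ ['_','v','a','r']) pas block pvAPrefixes =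
              some ("stress".toList ++ " L".toList ++
                PySem.List.slice (pre ++ ['_','v','a','r'])
                  (some (("stress_l".toList.length : Nat) : Int)) (some (-4)) ++
                " std".toList ++ pas ++ block) := by
            unfold pvAPrefixes
            rw [pv_loop_skip _ _ _ _ _ _ s1, pv_loop_skip _ _ _ _ _ _ s2,
                pv_loop_skip _ _ _ _ _ _ s3]
            exact pv_loop_first _ _ _ _ _ _ hcond
          exact pv_leaf1 _ pre m rest pas block _ h0 (by decide) (by decide) (by decide) hL
      case neg =>
        have n1 : ¬ ∃ m rest, pre.splitOn '_' = "energy".toList :: ('l' :: m) :: rest := by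
          rintro ⟨m, r, hc⟩
          have hcc := h0.symm.trans hc
          exact hsh ⟨⟨m, (List.cons.inj (List.cons.inj hcc).2).1⟩, Or.inl (List.cons.inj hcc).1⟩
        have n2 : ¬ ∃ m rest, pre.splitOn '_' = "forces".toList :: ('l' :: m) :: rest := by
          rintro ⟨m, r, hc⟩
          have hcc := h0.symm.trans hc
          exact hsh ⟨⟨m, (List.cons.inj (List.cons.inj hcc).2).1⟩,
            Or.inr (Or.inl (List.cons.inj hcc).1)⟩
        have n4 : ¬ ∃ m rest, pre.splitOn '_' = "stress".toList :: ('l' :: m) :: rest := by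
          rintro ⟨m, r, hc⟩
          have hcc := h0.symm.trans hc
          exact hsh ⟨⟨m, (List.cons.inj (List.cons.inj hcc).2).1⟩,
            Or.inr (Or.inr (List.cons.inj hcc).1)⟩
        have n3 : ¬ ∃ m rest, pre.splitOn '_' =
            "non".toList :: "conservative".toList :: "forces".toList :: ('l' :: m) :: rest := by
          rintro ⟨m, r, hc⟩
          exact hk (by rw [hc]; rfl)
        have n5 : ¬ ∃ m rest, pre.splitOn '_' =
            "non".toList :: "conservative".toList :: "stress".toList :: ('l' :: m) :: rest := by
          rintro ⟨m, r, hc⟩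
          exact hk (by rw [hc]; rfl)
        rw [pv_loopA_none pre pas block n1 n2 n3 n4 n5]
        rw [if_neg hk, h0]
        have hfalse : (decide (1 < (t0 :: t1 :: rest).length) &&
            PySem.Chars.startswith ((t0 :: t1 :: rest).getD 1 []) "l".toList &&
            pvBTargets.contains (PySem.Chars.join "_".toList
              ((t0 :: t1 :: rest).take 1))) = false := by
          rw [Bool.eq_false_iff]
          intro htrue
          rw [Bool.and_eq_true, Bool.and_eq_true] at htrue
          obtain ⟨⟨-, hsw⟩, hcont⟩ := htrue
          rw [show ((t0 :: t1 :: rest).getD 1 [] : List Char) = t1 from rfl,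
              show ("l".toList : List Char) = ['l'] by decide] at hsw
          obtain ⟨u, hu⟩ := (PySem.Chars.startswith_iff _ _).1 hsw
          rw [show ((t0 :: t1 :: rest).take 1 : List (List Char)) = [t0] from rfl,
              show PySem.Chars.join "_".toList [t0] = ['_'].intercalate [t0] from rfl,
              pv_ic_single] at hcont
          have hmem := List.contains_iff_mem.1 hcont
          simp only [pvBTargets, List.mem_cons, List.not_mem_nil, or_false] at hmem
          have hns : '_' ∉ t0 := pv_no_sep pre t0 (by rw [h0]; simp)
          rcases hmem with rfl | rfl | rfl | rfl | rfl
          · exact hsh ⟨⟨u, hu.symm⟩, Or.inl rfl⟩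
          · exact hsh ⟨⟨u, hu.symm⟩, Or.inr (Or.inl rfl)⟩
          · exact hsh ⟨⟨u, hu.symm⟩, Or.inr (Or.inr rfl)⟩
          · exact hns (by decide)
          · exact hns (by decide)
        rw [hfalse]
        simp

-- ===== assembling: the two ports agree =====

theorem pv_base (base pas block : List Char) :
    (match pvALoop base pas block pvAPrefixes with
     | some r => r
     | none =>
       if PySem.Chars.endswith base "_var".toList then
         PySem.List.slice base none (some (-4)) ++ " std".toList ++ pas ++ block
       else base ++ block) =
    (if PySem.Chars.endswith base "_var".toList then
       (if (decide ((if (PySem.Chars.splitOn (PySem.List.slice base none (some (-4))) "_".toList).take 2 = ["non".toList, "conservative".toList] then 3 else 1) < (PySem.Chars.splitOn (PySem.List.slice base none (some (-4))) "_".toList).length) &&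
        PySem.Chars.startswith ((PySem.Chars.splitOn (PySem.List.slice base none (some (-4))) "_".toList).getD (if (PySem.Chars.splitOn (PySem.List.slice base none (some (-4))) "_".toList).take 2 = ["non".toList, "conservative".toList] then 3 else 1) []) "l".toList &&
        pvBTargets.contains (PySem.Chars.join "_".toList ((PySem.Chars.splitOn (PySem.List.slice base none (some (-4))) "_".toList).take (if (PySem.Chars.splitOn (PySem.List.slice base none (some (-4))) "_".toList).take 2 = ["non".toList, "conservative".toList] then 3 else 1)))) = true then
      PySem.Chars.join "_".toList ((PySem.Chars.splitOn (PySem.List.slice base none (some (-4))) "_".toList).take (if (PySem.Chars.splitOn (PySem.List.slice base none (some (-4))) "_".toList).take 2 = ["non".toList, "conservative".toList] then 3 else 1)) ++ " L".toList ++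
        PySem.List.slice (PySem.Chars.join "_".toList ((PySem.Chars.splitOn (PySem.List.slice base none (some (-4))) "_".toList).drop (if (PySem.Chars.splitOn (PySem.List.slice base none (some (-4))) "_".toList).take 2 = ["non".toList, "conservative".toList] then 3 else 1))) (some 1) none ++
        " std".toList ++ pas ++ block
    else PySem.List.slice base none (some (-4)) ++ " std".toList ++ pas ++ block)
     else base ++ block) := by
  by_cases hend : PySem.Chars.endswith base "_var".toList = true
  case pos =>
    obtain ⟨pre, rfl⟩ : ∃ pre, base = pre ++ ['_', 'v', 'a', 'r'] := by
      rw [show ("_var".toList : List Char) = ['_', 'v', 'a', 'r'] by decide] at hend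
      obtain ⟨w, hw⟩ := (PySem.Chars.endswith_iff _ _).1 hend
      exact ⟨w, hw.symm⟩
    simp only [pv_endsA, eq_self_iff_true, if_true]
    rw [pv_stem_eq pre, pv_splitOn_eq pre]
    exact pv_tail pre pas block
  case neg =>
    have hend' : PySem.Chars.endswith base "_var".toList = false := Bool.eq_false_iff.2 hend
    have hend2 : PySem.Chars.endswith base ['_', 'v', 'a', 'r'] = false := by
      rw [show (['_', 'v', 'a', 'r'] : List Char) = "_var".toList by decide]
      exact hend'
    have hloop : pvALoop base pas block pvAPrefixes = none := by
      simp [pvALoop, pvAPrefixes, hend', hend2]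
    rw [hloop]
    simp [hend', hend2]

theorem pv_main (vk0 : List Char) (pa : Bool) : pvA vk0 pa = pvB vk0 pa := by
  unfold pvA pvB
  have hsep : (" (".toList : List Char) = [' ', '('] := by decide
  rw [hsep]
  dsimp only
  by_cases h : PySem.Chars.find vk0 [' ', '('] = -1
  case pos =>
    have hin : PySem.Chars.isIn [' ', '('] vk0 = false := by
      unfold PySem.Chars.isIn
      simp [h]
    rw [hin]
    simp only [Bool.false_eq_true, if_false, if_pos h]
    exact pv_base vk0 _ _
  case neg =>
    have hnn : 0 ≤ PySem.Chars.find vk0 [' ', '('] := by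
      have := PySem.Chars.neg_one_le_find vk0 [' ', '(']; omega
    have hin : PySem.Chars.isIn [' ', '('] vk0 = true := by
      unfold PySem.Chars.isIn
      simp [h]
    rw [hin]
    simp only [if_true, if_neg h]
    rw [pv_split_eq vk0 h]
    have hbase : PySem.List.slice vk0 none (some (PySem.Chars.find vk0 [' ', '('])) =
        vk0.take (PySem.Chars.find vk0 [' ', '(']).toNat := by
      rw [PySem.List.slice_to vk0 hnn]
    have hblock : PySem.List.slice vk0 (some (PySem.Chars.find vk0 [' ', '('])) none =
        vk0.drop (PySem.Chars.find vk0 [' ', '(']).toNat := by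
      rw [PySem.List.slice_from vk0 hnn]
    obtain ⟨hat, -⟩ := PySem.Chars.find_spec hnn
    obtain ⟨u, hu⟩ := hat
    have hdropj : vk0.drop (PySem.Chars.find vk0 [' ', '(']).toNat =
        ' ' :: '(' :: vk0.drop ((PySem.Chars.find vk0 [' ', '(']).toNat + 2) := by
      have h2 : (vk0.drop (PySem.Chars.find vk0 [' ', '(']).toNat).drop 2 = u := by
        rw [← hu]; simp
      rw [← hu, ← h2]
      simp
    rw [hbase, hblock, hdropj]
    exact pv_base (vk0.take (PySem.Chars.find vk0 [' ', '(']).toNat)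
      (if pa = true then " (per atom)".toList else [])
      (' ' :: '(' :: vk0.drop ((PySem.Chars.find vk0 [' ', '(']).toNat + 2))

-- ===== VERDICT (by name: the statement is the Claim_ definition above) =====
theorem var_key_to_metric_name_py_spec : Claim_equal_var_key_to_metric_name_py := by
  intro vk pa _
  unfold Spec_var_key_to_metric_name_py var_key_to_metric_name_py var_key_to_metric_name_py_alt
  rw [pv_main]
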